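-- pv_equiv track=rewrite | github.com/Rajat-BR/DSA-Code | Digit_Extraction/strictly_increasing_numbers.py | lol
-- ===== SOURCE A (Python) =====
-- def lol(nums):
--     count = 0
--     for n in nums:
--         digit = n % 10
--         n //= 10
--         flow = True   #reset flow after every loop, otherwise ill get wrong answer
--         while n > 0:
--             now = n % 10
--             if now < digit :
--                 flow = True
--             elif now >= digit:
--                 flow = False
--                 break
--             digit = now
--             n //= 10
--         if flow == True:
--             count +=1
--     return count
-- ===== SOURCE B (Python) =====
-- def lol(nums):
--     count = 0
--     for n in nums:
--         digits = []
--         while n > 0: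
--             digits.append(n % 10)
--             n //= 10
--         if all(a > b for a, b in zip(digits, digits[1:])):
--             count += 1
--     return count
-- ===== Notes on version B (the rewrite author's own statement) =====
-- stated objective: simpler
-- what changed: A fuses digit extraction with an early-break monotonicity scan holding a flag; B first materialises the digit list with a plain while loop and then checks strict decrease of adjacent pairs with zip/all in a separate pass.
import Mathlib
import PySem

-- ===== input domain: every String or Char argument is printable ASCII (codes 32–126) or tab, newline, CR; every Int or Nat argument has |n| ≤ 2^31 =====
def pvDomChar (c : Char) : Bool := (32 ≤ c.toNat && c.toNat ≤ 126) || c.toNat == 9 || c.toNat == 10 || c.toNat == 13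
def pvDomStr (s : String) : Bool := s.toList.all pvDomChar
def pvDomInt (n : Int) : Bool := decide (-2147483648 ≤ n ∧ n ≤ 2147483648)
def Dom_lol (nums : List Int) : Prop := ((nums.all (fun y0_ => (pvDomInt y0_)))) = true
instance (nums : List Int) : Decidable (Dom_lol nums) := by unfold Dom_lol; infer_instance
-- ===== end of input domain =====

-- B replaces A's fused extract-and-check loop with a flag by building the digit list first and then checking adjacent pairs; objective: simpler.


-- ===== PORT A =====
-- A's inner while loop: state (digit, n), returns the final 'flow'
def lolWhile (digit : Int) (n : Int) : Bool :=
  if _h : 0 < n then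
    let now := PySem.Int.mod n 10
    if now < digit then lolWhile now (PySem.Int.floordiv n 10)
    else false
  else true
termination_by n.toNat
decreasing_by
  rw [PySem.Int.floordiv_eq_ediv_of_pos (by omega : (0:Int) < 10)]
  omega

def lol (nums : List Int) : Int :=
  nums.foldl (fun count n =>
    let digit := PySem.Int.mod n 10
    let n1 := PySem.Int.floordiv n 10
    if lolWhile digit n1 then count + 1 else count) 0

-- ===== PORT B =====
-- B's digit-building while loop: digits of n, least significant first
def lolDigits (n : Int) : List Int :=
  if _h : 0 < n then PySem.Int.mod n 10 :: lolDigits (PySem.Int.floordiv n 10) else []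
termination_by n.toNat
decreasing_by
  rw [PySem.Int.floordiv_eq_ediv_of_pos (by omega : (0:Int) < 10)]
  omega

def lol_alt (nums : List Int) : Int :=
  nums.foldl (fun count n =>
    let digits := lolDigits n
    if (digits.zip (PySem.List.slice digits (some 1) none)).all (fun p => p.1 > p.2)
    then count + 1 else count) 0

-- ===== PRECONDITION & SPEC =====
def Spec_lol (nums : List Int) (out : Int) : Prop := out = lol_alt nums
instance (nums : List Int) (out : Int) : Decidable (Spec_lol nums out) := by unfold Spec_lol; infer_instance

-- ===== CLAIM (what is proved, stated in full; the proofs are below) =====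
def Claim_equal_lol : Prop := ∀ (nums : List Int), Dom_lol nums → Spec_lol nums (lol nums)

-- ===== LEMMAS AND PROOFS =====

-- B's adjacent-pairs check, as written in the port
def chk (ds : List Int) : Bool :=
  (ds.zip (PySem.List.slice ds (some 1) none)).all (fun p => p.1 > p.2)

theorem chk_nil : chk [] = true := by decide

theorem chk_single (a : Int) : chk [a] = true := by
  simp [chk, PySem.List.slice_from_one]

theorem chk_cons₂ (a b : Int) (r : List Int) :
    chk (a :: b :: r) = (decide (b < a) && chk (b :: r)) := by
  simp [chk, PySem.List.slice_from_one, List.zip]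

theorem key (d n : Int) : lolWhile d n = chk (d :: lolDigits n) := by
  rw [lolWhile, lolDigits]
  by_cases h : 0 < n
  · rw [dif_pos h, dif_pos h]
    by_cases h2 : PySem.Int.mod n 10 < d
    · rw [if_pos h2, key (PySem.Int.mod n 10) (PySem.Int.floordiv n 10),
        chk_cons₂, decide_eq_true h2, Bool.true_and]
    · rw [if_neg h2, chk_cons₂, decide_eq_false h2, Bool.false_and]
  · rw [dif_neg h, dif_neg h, chk_single]
termination_by n.toNat
decreasing_by
  rw [PySem.Int.floordiv_eq_ediv_of_pos (by omega : (0:Int) < 10)]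
  omega

theorem elem_eq (n : Int) :
    lolWhile (PySem.Int.mod n 10) (PySem.Int.floordiv n 10) = chk (lolDigits n) := by
  by_cases h : 0 < n
  · rw [key]
    conv_rhs => rw [lolDigits]
    rw [dif_pos h]
  · have h10 : PySem.Int.floordiv n 10 ≤ 0 := by
      rw [PySem.Int.floordiv_eq_ediv_of_pos (by omega : (0:Int) < 10)]
      omega
    rw [lolWhile, dif_neg (by omega), lolDigits, dif_neg h, chk_nil]

-- ===== VERDICT (by name: the statement is the Claim_ definition above) =====
theorem lol_spec : Claim_equal_lol := by
  intro nums _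
  unfold Spec_lol lol lol_alt
  congr 1
  funext c n
  simp only
  rw [elem_eq]
  rfl
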